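-- pv_equiv track=rewrite | github.com/TanmayBansal4/resume_chatbot | selection_rejection_model.py | split_summaries
-- ===== SOURCE A (Python) =====
-- def split_summaries(text):
--     shortlisted = []
--     rejected = []
--     current = []
--     label = None
--
--     for line in text.splitlines():
--         if "Shortlisted" in line:
--             if current and label:
--                 (shortlisted if label == "Shortlisted" else rejected).append("\n".join(current).strip())
--             current = []
--             label = "Shortlisted"
--         elif "Rejected" in line:
--             if current and label:
--                 (shortlisted if label == "Shortlisted" else rejected).append("\n".join(current).strip())
--             current = []
--             label = "Rejected"
--         else:
--             current.append(line)
--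
--     if current and label:
--         (shortlisted if label == "Shortlisted" else rejected).append("\n".join(current).strip())
--
--     return shortlisted, rejected
-- ===== SOURCE B (Python) =====
-- def split_summaries(text):
--     # Pass 1: cut the text into (label, lines) segments at header lines.
--     segments = []
--     label = None
--     lines = []
--     for line in text.splitlines():
--         if "Shortlisted" in line or "Rejected" in line:
--             segments.append((label, lines))
--             label = "Shortlisted" if "Shortlisted" in line else "Rejected"
--             lines = []
--         else:
--             lines.append(line)
--     segments.append((label, lines))
--     # Pass 2: emit each labelled, non-empty segment into its bucket.
--     shortlisted = []
--     rejected = []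
--     for lab, ls in segments:
--         if ls and lab is not None:
--             block = "\n".join(ls).strip()
--             (shortlisted if lab == "Shortlisted" else rejected).append(block)
--     return shortlisted, rejected
-- ===== Notes on version B (the rewrite author's own statement) =====
-- stated objective: alternative
-- what changed: Replaces A's single loop with inlined flush-on-header bookkeeping by a two-pass decomposition: pass one cuts the text into (label, lines) segments, pass two emits each labelled non-empty segment into its bucket.
import Mathlib
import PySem

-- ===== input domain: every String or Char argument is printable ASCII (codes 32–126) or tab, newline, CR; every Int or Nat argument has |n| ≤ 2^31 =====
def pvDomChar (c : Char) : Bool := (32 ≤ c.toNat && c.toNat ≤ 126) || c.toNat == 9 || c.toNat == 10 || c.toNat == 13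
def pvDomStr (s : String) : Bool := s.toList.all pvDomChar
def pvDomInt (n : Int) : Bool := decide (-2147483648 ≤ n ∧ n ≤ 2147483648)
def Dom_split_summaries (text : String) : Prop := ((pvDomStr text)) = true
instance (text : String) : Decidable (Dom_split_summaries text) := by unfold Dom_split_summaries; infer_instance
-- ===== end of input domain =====

-- B is an equivalent two-pass decomposition of A: segment first, then bucket the labelled segments.

-- ===== PORT A =====
-- the repeated '(shortlisted if label == "Shortlisted" else rejected).append("\n".join(current).strip())'
-- guarded by 'if current and label' (label truthy = some non-empty string)
def pvFlushA (sh rej cur : List String) (lab : Option String) : List String × List String :=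
  if cur ≠ [] ∧ lab ≠ none ∧ lab ≠ some "" then
    if lab = some "Shortlisted" then (sh ++ [PySem.Str.strip (PySem.Str.join "\n" cur)], rej)
    else (sh, rej ++ [PySem.Str.strip (PySem.Str.join "\n" cur)])
  else (sh, rej)

def pvStepA (st : List String × List String × List String × Option String) (line : String) :
    List String × List String × List String × Option String :=
  let sh := st.1; let rej := st.2.1; let cur := st.2.2.1; let lab := st.2.2.2
  if PySem.Str.isIn "Shortlisted" line then
    let p := pvFlushA sh rej cur lab
    (p.1, p.2, [], some "Shortlisted")
  else if PySem.Str.isIn "Rejected" line then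
    let p := pvFlushA sh rej cur lab
    (p.1, p.2, [], some "Rejected")
  else (sh, rej, cur ++ [line], lab)

def split_summaries (text : String) : List String × List String :=
  let r := (PySem.Str.splitlines text).foldl pvStepA ([], [], [], none)
  pvFlushA r.1 r.2.1 r.2.2.1 r.2.2.2

-- ===== PORT B =====
def pvStepB (st : List (Option String × List String) × Option String × List String) (line : String) :
    List (Option String × List String) × Option String × List String :=
  let segs := st.1; let lab := st.2.1; let lines := st.2.2
  if PySem.Str.isIn "Shortlisted" line ∨ PySem.Str.isIn "Rejected" line then
    (segs ++ [(lab, lines)],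
     some (if PySem.Str.isIn "Shortlisted" line then "Shortlisted" else "Rejected"), [])
  else (segs, lab, lines ++ [line])

def pvStep2B (acc : List String × List String) (seg : Option String × List String) :
    List String × List String :=
  match seg with
  | (some l, ls) =>
    if ls ≠ [] then
      if l = "Shortlisted" then (acc.1 ++ [PySem.Str.strip (PySem.Str.join "\n" ls)], acc.2)
      else (acc.1, acc.2 ++ [PySem.Str.strip (PySem.Str.join "\n" ls)])
    else acc
  | (none, _) => acc

def split_summaries_alt (text : String) : List String × List String :=
  let r := (PySem.Str.splitlines text).foldl pvStepB ([], none, [])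
  (r.1 ++ [(r.2.1, r.2.2)]).foldl pvStep2B ([], [])

-- ===== PRECONDITION & SPEC =====
def Spec_split_summaries (text : String) (out : List String × List String) : Prop := out = split_summaries_alt text
instance (text : String) (out : List String × List String) : Decidable (Spec_split_summaries text out) := by unfold Spec_split_summaries; infer_instance

-- ===== CLAIM (what is proved, stated in full; the proofs are below) =====
def Claim_equal_split_summaries : Prop := ∀ (text : String), Dom_split_summaries text → Spec_split_summaries text (split_summaries text)

-- ===== LEMMAS AND PROOFS =====

-- labels A/B can ever hold
def pvLabOK (lab : Option String) : Prop :=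
  lab = none ∨ lab = some "Shortlisted" ∨ lab = some "Rejected"

theorem pvFlushA_eq_step2 (sh rej cur : List String) (lab : Option String) (h : pvLabOK lab) :
    pvFlushA sh rej cur lab = pvStep2B (sh, rej) (lab, cur) := by
  rcases h with h | h | h <;> subst h <;>
    by_cases hc : cur = [] <;> simp [pvFlushA, pvStep2B, hc]

theorem pvStepB_segs (lines : List String) :
    ∀ (segs : List (Option String × List String)) (lab : Option String) (cur : List String),
      lines.foldl pvStepB (segs, lab, cur) =
        (segs ++ (lines.foldl pvStepB ([], lab, cur)).1, (lines.foldl pvStepB ([], lab, cur)).2) := by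
  induction lines with
  | nil => intro segs lab cur; simp
  | cons l ls ih =>
    intro segs lab cur
    simp only [List.foldl_cons, pvStepB]
    by_cases h1 : PySem.Str.isIn "Shortlisted" l ∨ PySem.Str.isIn "Rejected" l
    · simp only [h1, if_pos]
      rw [ih (segs ++ [(lab, cur)]), ih ([] ++ [(lab, cur)])]
      simp
    · simp only [h1, if_neg, not_false_iff]
      exact ih segs lab (cur ++ [l])

theorem pv_main (lines : List String) :
    ∀ (sh rej cur : List String) (lab : Option String), pvLabOK lab →
      (let r := lines.foldl pvStepA (sh, rej, cur, lab)
       pvFlushA r.1 r.2.1 r.2.2.1 r.2.2.2) =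
      (let b := lines.foldl pvStepB ([], lab, cur)
       (b.1 ++ [(b.2.1, b.2.2)]).foldl pvStep2B (sh, rej)) := by
  induction lines with
  | nil =>
    intro sh rej cur lab h
    simpa using pvFlushA_eq_step2 sh rej cur lab h
  | cons l ls ih =>
    intro sh rej cur lab h
    simp only [List.foldl_cons]
    by_cases h1 : PySem.Str.isIn "Shortlisted" l
    · simp only [pvStepA, pvStepB, h1, if_pos, true_or, List.nil_append]
      rw [pvStepB_segs ls [(lab, cur)] (some "Shortlisted") []]
      simp only [List.cons_append, List.foldl_cons]
      rw [← pvFlushA_eq_step2 sh rej cur lab h]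
      simpa using ih (pvFlushA sh rej cur lab).1 (pvFlushA sh rej cur lab).2 [] (some "Shortlisted") (Or.inr (Or.inl rfl))
    · by_cases h2 : PySem.Str.isIn "Rejected" l
      · simp only [pvStepA, pvStepB, h1, h2, if_neg, if_pos, not_false_iff, false_or,
          Bool.false_eq_true, List.nil_append]
        rw [pvStepB_segs ls [(lab, cur)] (some "Rejected") []]
        simp only [List.cons_append, List.foldl_cons]
        rw [← pvFlushA_eq_step2 sh rej cur lab h]
        simpa using ih (pvFlushA sh rej cur lab).1 (pvFlushA sh rej cur lab).2 [] (some "Rejected") (Or.inr (Or.inr rfl))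
      · simp only [pvStepA, pvStepB, h1, h2, if_neg, not_false_iff, Bool.false_eq_true, or_self]
        exact ih sh rej (cur ++ [l]) lab h

-- ===== VERDICT (by name: the statement is the Claim_ definition above) =====
theorem split_summaries_spec : Claim_equal_split_summaries := by
  intro text _
  unfold Spec_split_summaries split_summaries split_summaries_alt
  simpa using pv_main (PySem.Str.splitlines text) [] [] [] none (Or.inl rfl)
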